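-- pv_equiv track=rewrite | github.com/AdamedPharma/pepseq | Peptide/utils/chemistry/Graph.py | get_peptide_bonds
-- ===== SOURCE A (Python) =====
-- def get_peptide_bonds(n_ca_co: list) -> list:
--     """
--
--     Input:
--         n_ca_co - list of [N, Ca, Co ... N, Ca, Co]
--         atoms
--
--     Output:
--         peptide_bonds
--
--     """
--
--     peptide_bonds = []
--
--     for i in range(0, len(n_ca_co), 3)[:-1]:
--         co_atom = i + 2
--         n_atom = i + 3
--         edge = (n_ca_co[co_atom], n_ca_co[n_atom])
--         peptide_bonds.append(edge)
--
--     return peptide_bonds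
-- ===== SOURCE B (Python) =====
-- def get_peptide_bonds(n_ca_co: list) -> list:
--     # group-first decomposition: slice the flat atom list into residue triples,
--     # then connect adjacent residues (last Co -> next N)
--     residues = [n_ca_co[i:i + 3] for i in range(0, len(n_ca_co), 3)]
--     return [(prev[2], nxt[0]) for prev, nxt in zip(residues, residues[1:])]
-- ===== Notes on version B (the rewrite author's own statement) =====
-- stated objective: alternative
-- what changed: Replaces the stepped index-arithmetic loop (range(0,len,3)[:-1] with i+2/i+3 lookups) by a group-first decomposition: slice the atom list into residue triples, then pair adjacent residues (prev[2], next[0]).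
import Mathlib
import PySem

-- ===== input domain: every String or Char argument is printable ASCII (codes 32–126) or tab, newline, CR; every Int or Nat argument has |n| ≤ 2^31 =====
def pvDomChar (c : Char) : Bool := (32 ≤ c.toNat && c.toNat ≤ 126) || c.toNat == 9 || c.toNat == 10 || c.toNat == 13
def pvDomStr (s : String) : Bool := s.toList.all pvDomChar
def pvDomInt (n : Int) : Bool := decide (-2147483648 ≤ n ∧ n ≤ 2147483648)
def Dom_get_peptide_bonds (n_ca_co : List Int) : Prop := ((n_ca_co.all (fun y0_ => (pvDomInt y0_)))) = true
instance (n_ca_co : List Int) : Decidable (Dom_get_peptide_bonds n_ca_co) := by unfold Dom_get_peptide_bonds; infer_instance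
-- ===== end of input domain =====

-- B replaces A's stepped index-arithmetic loop by a group-into-triples-then-pair-adjacent decomposition (alternative, same cost).

-- ===== PORT A =====
-- the indices i+2 and i+3 are always in range (i is a non-final start of range(0,len,3)),
-- so the .getD 0 default never fires and A is total
def get_peptide_bonds (n_ca_co : List Int) : List (Int × Int) :=
  (PySem.List.slice (PySem.List.pyRange 0 (n_ca_co.length : Int) 3) none (some (-1))).foldl
    (fun peptide_bonds i =>
      let co_atom := i + 2
      let n_atom := i + 3
      let edge := ((PySem.List.pyGet? n_ca_co co_atom).getD 0,
                   (PySem.List.pyGet? n_ca_co n_atom).getD 0)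
      peptide_bonds ++ [edge]) []

-- ===== PORT B =====
-- residues = [n_ca_co[i:i+3] for i in range(0, len(n_ca_co), 3)]; then pair adjacent residues.
-- prev[2] / nxt[0] are always in range (every non-last residue is a full triple,
-- every residue is nonempty), so the .getD 0 default never fires
def get_peptide_bonds_alt (n_ca_co : List Int) : List (Int × Int) :=
  let residues := (PySem.List.pyRange 0 (n_ca_co.length : Int) 3).map
    (fun i => PySem.List.slice n_ca_co (some i) (some (i + 3)))
  (residues.zip residues.tail).map (fun pq =>
    ((PySem.List.pyGet? pq.1 2).getD 0, (PySem.List.pyGet? pq.2 0).getD 0))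

-- ===== PRECONDITION & SPEC =====
def Spec_get_peptide_bonds (n_ca_co : List Int) (out : List (Int × Int)) : Prop := out = get_peptide_bonds_alt n_ca_co
instance (n_ca_co : List Int) (out : List (Int × Int)) : Decidable (Spec_get_peptide_bonds n_ca_co out) := by unfold Spec_get_peptide_bonds; infer_instance

-- ===== CLAIM (what is proved, stated in full; the proofs are below) =====
def Claim_equal_get_peptide_bonds : Prop := ∀ (n_ca_co : List Int), Dom_get_peptide_bonds n_ca_co → Spec_get_peptide_bonds n_ca_co (get_peptide_bonds n_ca_co)

-- ===== LEMMAS AND PROOFS =====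

-- proof-only view of B's residue list as a structural recursion
def chunks3 : List Int → List (List Int)
  | [] => []
  | [x] => [[x]]
  | [x, y] => [[x, y]]
  | x :: y :: z :: rest => [x, y, z] :: chunks3 rest

-- proof-only restatement of B's value over chunks3
def Bfun (n_ca_co : List Int) : List (Int × Int) :=
  let residues := chunks3 n_ca_co
  (residues.zip residues.tail).map (fun pq =>
    ((PySem.List.pyGet? pq.1 2).getD 0, (PySem.List.pyGet? pq.2 0).getD 0))

-- reference recursion both ports are reduced to: emit (Co, N) and step one residue
def direct : List Int → List (Int × Int)
  | [] => []
  | [_] => []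
  | [_, _] => []
  | [_, _, _] => []
  | _ :: _ :: c :: d :: rest => (c, d) :: direct (d :: rest)

theorem foldl_append_map (l : List Int) (f : Int → Int × Int) (init : List (Int × Int)) :
    l.foldl (fun acc i => acc ++ [f i]) init = init ++ l.map f := by
  induction l generalizing init with
  | nil => simp
  | cons x xs ih => simp [List.foldl_cons, ih]

theorem dropLast_range (m : ℕ) : (List.range m).dropLast = List.range (m - 1) := by
  cases m with
  | zero => simp
  | succ t => simp [List.range_succ]

theorem pyRange3 (n : ℕ) :
    PySem.List.pyRange 0 (n : Int) 3 = (List.range ((n + 2) / 3)).map (fun k : ℕ => 3 * (k : Int)) := by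
  rw [PySem.List.pyRange_of_pos 0 (n : Int) (by norm_num)]
  have hcount : (if (0 : Int) < n then (((n : Int) - 0 + 3 - 1) / 3).toNat else 0) = (n + 2) / 3 := by
    split_ifs with h
    · omega
    · omega
  rw [hcount]
  simp only [zero_add]

-- A's value as an explicit map over residue indices
def Afun (xs : List Int) : List (Int × Int) :=
  (List.range ((xs.length + 2) / 3 - 1)).map
    (fun k => ((xs[3 * k + 2]?).getD 0, (xs[3 * k + 3]?).getD 0))

theorem A_eq_Afun (xs : List Int) : get_peptide_bonds xs = Afun xs := by
  unfold get_peptide_bonds Afun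
  rw [PySem.List.slice_to_neg_one, pyRange3, foldl_append_map]
  rw [← List.map_dropLast, dropLast_range, List.map_map, List.nil_append]
  refine List.map_congr_left ?_
  intro k _
  simp only [Function.comp_apply]
  have h2 : (3 * (k : Int) + 2) = ((3 * k + 2 : ℕ) : Int) := by push_cast; ring
  have h3 : (3 * (k : Int) + 3) = ((3 * k + 3 : ℕ) : Int) := by push_cast; ring
  rw [h2, h3, PySem.List.pyGet?_natCast, PySem.List.pyGet?_natCast]

theorem Afun_eq_direct (xs : List Int) : Afun xs = direct xs := by
  induction xs using direct.induct with
  | case1 => simp [Afun, direct]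
  | case2 x => simp [Afun, direct]
  | case3 x y => simp [Afun, direct]
  | case4 x y z => simp [Afun, direct]
  | case5 a b c d rest ih =>
    rw [direct]
    rw [← ih]
    unfold Afun
    have hlen : ((a :: b :: c :: d :: rest).length + 2) / 3 - 1 =
        (((d :: rest).length + 2) / 3 - 1) + 1 := by
      simp only [List.length_cons]
      omega
    rw [hlen, List.range_succ_eq_map, List.map_cons, List.map_map]
    refine congrArg₂ List.cons (by norm_num) ?_
    refine List.map_congr_left ?_
    intro k _
    simp only [Function.comp_apply, Nat.succ_eq_add_one]
    have h2 : 3 * (k + 1) + 2 = ((3 * k + 2) + 1 + 1) + 1 := by ring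
    have h3 : 3 * (k + 1) + 3 = ((3 * k + 3) + 1 + 1) + 1 := by ring
    rw [h2, h3]
    simp only [List.getElem?_cons_succ]

theorem map_slice_eq_chunks3 (xs : List Int) :
    (List.range ((xs.length + 2) / 3)).map (fun k : ℕ => (xs.drop (3 * k)).take 3) = chunks3 xs := by
  induction xs using chunks3.induct with
  | case1 => simp [chunks3]
  | case2 x => simp [chunks3, List.range_succ]
  | case3 x y => simp [chunks3, List.range_succ]
  | case4 x y z rest ih =>
    have hm : ((x :: y :: z :: rest).length + 2) / 3 = ((rest.length + 2) / 3) + 1 := by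
      simp only [List.length_cons]
      omega
    rw [hm, List.range_succ_eq_map, List.map_cons, List.map_map, chunks3]
    refine congrArg₂ List.cons (by simp) ?_
    rw [← ih]
    refine List.map_congr_left ?_
    intro k _
    simp only [Function.comp_apply, Nat.succ_eq_add_one]
    have h1 : 3 * (k + 1) = ((3 * k) + 1 + 1) + 1 := by ring
    rw [h1]
    simp only [List.drop_succ_cons]

theorem alt_eq_Bfun (xs : List Int) : get_peptide_bonds_alt xs = Bfun xs := by
  have hres : (PySem.List.pyRange 0 (xs.length : Int) 3).map
      (fun i => PySem.List.slice xs (some i) (some (i + 3))) = chunks3 xs := by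
    rw [pyRange3, List.map_map, ← map_slice_eq_chunks3 xs]
    refine List.map_congr_left ?_
    intro k _
    simp only [Function.comp_apply]
    have e1 : (3 * (k : ℤ)) = ((3 * k : ℕ) : ℤ) := by push_cast; ring
    have e2 : (3 * (k : ℤ) + 3) = ((3 * k : ℕ) : ℤ) + ((3 : ℕ) : ℤ) := by push_cast; ring
    rw [e2, e1, PySem.List.slice_natCast_add]
  unfold get_peptide_bonds_alt Bfun
  rw [hres]

theorem Bfun_eq_direct (xs : List Int) : Bfun xs = direct xs := by
  induction xs using direct.induct with
  | case1 => rfl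
  | case2 x => rfl
  | case3 x y => rfl
  | case4 x y z => rfl
  | case5 a b c d rest ih =>
    rw [direct, ← ih]
    unfold Bfun
    match rest with
    | [] => simp [chunks3, PySem.List.pyGet?, PySem.List.pyIdx?]
    | [e] => simp [chunks3, PySem.List.pyGet?, PySem.List.pyIdx?]
    | e :: f :: rest' =>
      rcases h : chunks3 rest' with _ | ⟨h0, t⟩ <;>
        simp [chunks3, h, PySem.List.pyGet?, PySem.List.pyIdx?]

-- ===== VERDICT (by name: the statement is the Claim_ definition above) =====
theorem get_peptide_bonds_spec : Claim_equal_get_peptide_bonds := by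
  intro xs _
  unfold Spec_get_peptide_bonds
  rw [A_eq_Afun, Afun_eq_direct, alt_eq_Bfun, Bfun_eq_direct]
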